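-- pv_equiv track=rewrite | github.com/greatertomi/problem-solving | hackerrank-challenges/easy2/funny-string.py | funnyString
-- ===== SOURCE A (Python) =====
-- def funnyString(string):
--     strArray1 = [ord(char) for char in string]
--     strArray2 = strArray1[::-1]
--     arr1 = [abs(strArray1[i] - strArray1[i-1]) for i in range(1, len(strArray1))]
--     arr2 = [abs(strArray2[i] - strArray2[i-1]) for i in range(1, len(strArray2))]
--     if arr1 == arr2:
--         return 'Funny'
--     else:
--         return 'Not Funny'
-- ===== SOURCE B (Python) =====
-- def funnyString(string):
--     codes = [ord(c) for c in string]
--     d = [abs(a - b) for a, b in zip(codes, codes[1:])]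
--     left, right = 0, len(d) - 1
--     while left < right:
--         if d[left] != d[right]:
--             return 'Not Funny'
--         left += 1
--         right -= 1
--     return 'Funny'
-- ===== Notes on version B (the rewrite author's own statement) =====
-- stated objective: simpler
-- what changed: B builds one adjacent-difference list and checks it is a palindrome with an inward two-pointer loop that stops at the first mismatch, instead of building the reversed string and a second full difference array and comparing the two arrays.
import Mathlib
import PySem

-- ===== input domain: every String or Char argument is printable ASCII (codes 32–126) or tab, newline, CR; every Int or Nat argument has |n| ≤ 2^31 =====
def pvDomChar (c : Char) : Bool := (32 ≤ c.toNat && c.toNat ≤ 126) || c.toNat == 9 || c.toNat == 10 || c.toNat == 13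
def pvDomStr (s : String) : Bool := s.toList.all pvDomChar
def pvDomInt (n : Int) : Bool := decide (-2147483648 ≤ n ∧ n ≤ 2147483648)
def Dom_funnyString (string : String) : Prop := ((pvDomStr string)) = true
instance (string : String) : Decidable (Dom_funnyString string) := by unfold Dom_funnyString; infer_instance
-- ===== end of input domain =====

-- B replaces A's reversed copy + second difference array by a single difference list
-- checked with an inward two-pointer palindrome loop (same O(n) cost, simpler shape).

-- ===== PORT A =====
-- literal transliteration of A; list indices produced by range(1, len) are always in
-- range, so pyGetD's default 0 is never used
def funnyString (string : String) : String :=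
  let strArray1 : List Int := string.toList.map (fun c => (c.toNat : Int))
  let strArray2 : List Int := (PySem.List.slice? strArray1 none none (-1)).getD []
  let arr1 : List Int := (PySem.List.pyRange 1 (strArray1.length : Int) 1).map
    (fun i => |PySem.List.pyGetD strArray1 i 0 - PySem.List.pyGetD strArray1 (i - 1) 0|)
  let arr2 : List Int := (PySem.List.pyRange 1 (strArray2.length : Int) 1).map
    (fun i => |PySem.List.pyGetD strArray2 i 0 - PySem.List.pyGetD strArray2 (i - 1) 0|)
  if arr1 = arr2 then "Funny" else "Not Funny"

-- ===== PORT B =====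
-- the while-loop of Source B: returns false at the first mismatch ('Not Funny'),
-- true when the pointers meet or cross ('Funny'); indices stay in range
def pvPal (d : List Int) (l r : Int) : Bool :=
  if l < r then
    if PySem.List.pyGetD d l 0 ≠ PySem.List.pyGetD d r 0 then false
    else pvPal d (l + 1) (r - 1)
  else true
termination_by (r - l).toNat
decreasing_by
  omega

def funnyString_alt (string : String) : String :=
  let codes : List Int := string.toList.map (fun c => (c.toNat : Int))
  let d : List Int := List.zipWith (fun a b => |a - b|) codes (codes.drop 1)
  if pvPal d 0 ((d.length : Int) - 1) then "Funny" else "Not Funny"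

-- ===== PRECONDITION & SPEC =====
def Spec_funnyString (string : String) (out : String) : Prop := out = funnyString_alt string
instance (string : String) (out : String) : Decidable (Spec_funnyString string out) := by unfold Spec_funnyString; infer_instance

-- ===== CLAIM (what is proved, stated in full; the proofs are below) =====
def Claim_equal_funnyString : Prop := ∀ (string : String), Dom_funnyString string → Spec_funnyString string (funnyString string)

-- ===== LEMMAS AND PROOFS =====

-- A's i-th difference list (over any code list xs) equals the zipWith difference list
theorem pvArr_eq_zip (xs : List Int) :
    (PySem.List.pyRange 1 (xs.length : Int) 1).map
      (fun i => |PySem.List.pyGetD xs i 0 - PySem.List.pyGetD xs (i - 1) 0|)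
    = List.zipWith (fun a b => |a - b|) xs (xs.drop 1) := by
  apply List.ext_getElem
  · simp [PySem.List.length_pyRange_one]
  · intro k h1 h2
    have hk : k + 1 < xs.length := by
      simp [PySem.List.length_pyRange_one] at h1; omega
    have e1 : (1 : Int) + (k : Int) = ((k + 1 : Nat) : Int) := by push_cast; ring
    simp only [List.getElem_map, PySem.List.getElem_pyRange_one, List.getElem_zipWith,
      List.getElem_drop, e1]
    have e2 : ((k + 1 : Nat) : Int) - 1 = ((k : Nat) : Int) := by push_cast; ring
    rw [e2]
    simp only [PySem.List.pyGetD_natCast]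
    rw [List.getD_eq_getElem _ _ hk, List.getD_eq_getElem _ _ (by omega)]
    rw [abs_sub_comm]
    simp [Nat.add_comm 1 k]

-- reversing the codes reverses the difference list
theorem pvZip_reverse (xs : List Int) :
    List.zipWith (fun a b : Int => |a - b|) xs.reverse (xs.reverse.drop 1)
    = (List.zipWith (fun a b : Int => |a - b|) xs (xs.drop 1)).reverse := by
  have hget : ∀ (l : List Int) (i j : Nat) (hi : i < l.length) (hj : j < l.length),
      i = j → l[i] = l[j] := by
    intro l i j hi hj h; subst h; rfl
  apply List.ext_getElem
  · simp
  · intro k h1 h2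
    simp only [List.length_zipWith, List.length_reverse, List.length_drop] at h1 h2
    simp only [List.getElem_zipWith, List.getElem_drop, List.getElem_reverse,
      List.length_zipWith, List.length_drop]
    rw [abs_sub_comm]
    congr 1
    congr 1
    · apply hget; omega
    · apply hget; omega

-- two-pointer loop characterisation
theorem pvPal_iff (d : List Int) (l r : Int) :
    pvPal d l r = true ↔
      ∀ i : Int, l ≤ i → i ≤ r →
        PySem.List.pyGetD d i 0 = PySem.List.pyGetD d (l + r - i) 0 := by
  induction l, r using pvPal.induct d with
  | case1 l r hlr hne =>
    rw [pvPal, if_pos hlr, if_pos hne]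
    constructor
    · intro h; exact absurd h (by simp)
    · intro hall
      have := hall l le_rfl (by omega)
      rw [show l + r - l = r by ring] at this
      exact absurd this hne
  | case2 l r hlr hne ih =>
    rw [pvPal, if_pos hlr, if_neg hne]
    rw [not_not] at hne
    rw [ih]
    constructor
    · intro hall i h1 h2
      by_cases hil : i = l
      · subst hil
        rw [show i + r - i = r by ring]
        exact hne
      · by_cases hir : i = r
        · subst hir
          rw [show l + i - i = l by ring]
          exact hne.symm
        · have := hall i (by omega) (by omega)
          rwa [show l + 1 + (r - 1) - i = l + r - i by ring] at this
    · intro hall i h1 h2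
      have := hall i (by omega) (by omega)
      rwa [show l + r - i = l + 1 + (r - 1) - i by ring] at this
  | case3 l r hlr =>
    rw [pvPal, if_neg hlr]
    simp only [true_iff]
    intro i h1 h2
    have he : l + r - i = i := by omega
    rw [he]


-- the loop from 0 to len-1 decides the palindrome property
theorem pvPal_palindrome (d : List Int) :
    pvPal d 0 ((d.length : Int) - 1) = true ↔ d = d.reverse := by
  have hgd : ∀ (j : Nat) (hj : j < d.length), PySem.List.pyGetD d (j : Int) 0 = d[j]'hj := by
    intro j hj
    rw [PySem.List.pyGetD_natCast, List.getD_eq_getElem _ _ hj]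
  rw [pvPal_iff]
  constructor
  · intro hall
    apply List.ext_getElem
    · simp
    · intro k hk hk'
      have h1 := hall (k : Int) (by omega) (by omega)
      have e1 : (0 : Int) + ((d.length : Int) - 1) - (k : Int) = ((d.length - 1 - k : Nat) : Int) := by
        omega
      rw [e1, hgd k hk, hgd _ (by omega)] at h1
      rw [List.getElem_reverse]
      exact h1
  · intro hpal i h1 h2
    have hk : i.toNat < d.length := by omega
    have e0 : i = ((i.toNat : Nat) : Int) := by omega
    have e1 : (0 : Int) + ((d.length : Int) - 1) - ((i.toNat : Nat) : Int) = ((d.length - 1 - i.toNat : Nat) : Int) := by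
      omega
    rw [e0, e1, hgd _ hk, hgd _ (by omega)]
    rw [List.getElem_of_eq hpal hk, List.getElem_reverse]

-- ===== VERDICT (by name: the statement is the Claim_ definition above) =====
theorem funnyString_spec : Claim_equal_funnyString := by
  intro string _
  unfold Spec_funnyString funnyString funnyString_alt
  simp only [PySem.List.slice?_none_none_neg_one, Option.getD_some]
  rw [pvArr_eq_zip, pvArr_eq_zip, pvZip_reverse]
  by_cases h :
      List.zipWith (fun a b : Int => |a - b|)
          (string.toList.map (fun c => ((c.toNat : Nat) : Int)))
          ((string.toList.map (fun c => ((c.toNat : Nat) : Int))).drop 1)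
        = (List.zipWith (fun a b : Int => |a - b|)
          (string.toList.map (fun c => ((c.toNat : Nat) : Int)))
          ((string.toList.map (fun c => ((c.toNat : Nat) : Int))).drop 1)).reverse
  · rw [if_pos ((pvPal_palindrome _).mpr h), if_pos h]
  · rw [if_neg (fun hp => h ((pvPal_palindrome _).mp hp)), if_neg h]
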